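-- pv_equiv track=rewrite | github.com/bastienvanderplaetse/SerpentDonkeyKongGamePlugin | files/api/api.py | _epurate
-- ===== SOURCE A (Python) =====
-- def _epurate(locations):
--     temp = []
--     epurated = []
--     for i in range(0,len(locations)):
--         if(not locations[i][0] in temp and not locations[i][0]-1 in temp and not locations[i][0]+1 in temp):
--             temp.append(locations[i][0])
--             epurated.append(locations[i])
--     return epurated
-- ===== SOURCE B (Python) =====
-- def _epurate(locations):
--     epurated = []
--     pending = list(locations)
--     while pending:
--         head = pending[0]
--         v = head[0]
--         epurated.append(head)
--         pending = [loc for loc in pending[1:] if abs(loc[0] - v) > 1]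
--     return epurated
-- ===== Notes on version B (the rewrite author's own statement) =====
-- stated objective: alternative
-- what changed: B is a sieve: instead of accumulating kept keys and testing each location's key, key-1 and key+1 against that collection, B keeps no kept-key collection at all - it repeatedly takes the head of a shrinking worklist, appends it to the output, and filters the rest of the worklist removing every location whose key lies within 1 of the head; no membership test remains.
import Mathlib
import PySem

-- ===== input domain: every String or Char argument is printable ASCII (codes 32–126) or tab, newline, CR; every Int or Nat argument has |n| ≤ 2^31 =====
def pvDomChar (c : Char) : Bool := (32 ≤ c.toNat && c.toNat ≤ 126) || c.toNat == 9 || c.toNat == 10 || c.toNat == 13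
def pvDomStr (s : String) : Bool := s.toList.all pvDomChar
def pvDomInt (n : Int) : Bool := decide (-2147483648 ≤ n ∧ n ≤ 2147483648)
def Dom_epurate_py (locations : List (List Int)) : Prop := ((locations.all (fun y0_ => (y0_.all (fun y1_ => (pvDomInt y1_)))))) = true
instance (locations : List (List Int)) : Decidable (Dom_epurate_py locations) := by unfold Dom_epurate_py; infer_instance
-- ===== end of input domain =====

-- B is a sieve over a shrinking worklist (keep the head, filter out its ±1 neighbourhood,
-- repeat) instead of A's pass accumulating kept keys with membership tests; same cost.

-- ===== PORT A =====
-- indexed loop over range(0, len(locations)); state = (temp, epurated)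
def epurate_py (locations : List (List Int)) : List (List Int) :=
  ((PySem.List.pyRange 0 locations.length 1).foldl
    (fun (st : List Int × List (List Int)) i =>
      let loc := PySem.List.pyGetD locations i []
      let x := PySem.List.pyGetD loc 0 0
      if ¬ x ∈ st.1 ∧ ¬ (x - 1) ∈ st.1 ∧ ¬ (x + 1) ∈ st.1 then
        (st.1 ++ [x], st.2 ++ [loc])
      else st)
    ([], [])).2

-- ===== PORT B =====
def pvKey (loc : List Int) : Int := PySem.List.pyGetD loc 0 0

-- Source B's while loop over the worklist `pending`, as a recursion on that worklist
def epurateSieve : List (List Int) → List (List Int)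
  | [] => []
  | head :: rest =>
    head :: epurateSieve (rest.filter (fun loc => decide (1 < |pvKey loc - pvKey head|)))
  termination_by l => l.length
  decreasing_by
    have := List.length_filter_le
      (fun x : {x // x ∈ rest} => decide (1 < |pvKey x.1 - pvKey head|)) rest.attach
    simp at this ⊢; omega

def epurate_py_alt (locations : List (List Int)) : List (List Int) :=
  epurateSieve locations

-- ===== PRECONDITION & SPEC =====
-- Pre_ excludes inputs with an empty inner list: there locations[i][0] raises IndexError (in A and in B alike).
def Pre_epurate_py (locations : List (List Int)) : Prop :=
  (locations.all (fun loc => !loc.isEmpty)) = true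
instance (locations : List (List Int)) : Decidable (Pre_epurate_py locations) := by unfold Pre_epurate_py; infer_instance
def pvWitness_epurate_py : List (List Int) := [[3, 0], [4, 1], [7]]

def Spec_epurate_py (locations : List (List Int)) (out : List (List Int)) : Prop := out = epurate_py_alt locations
instance (locations : List (List Int)) (out : List (List Int)) : Decidable (Spec_epurate_py locations out) := by unfold Spec_epurate_py; infer_instance

-- ===== CLAIM (what is proved, stated in full; the proofs are below) =====
def Claim_equal_epurate_py : Prop := ∀ (locations : List (List Int)), Dom_epurate_py locations → Pre_epurate_py locations → Spec_epurate_py locations (epurate_py locations)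

-- ===== LEMMAS AND PROOFS =====

theorem epurateSieve_nil : epurateSieve [] = [] := by rw [epurateSieve.eq_def]

theorem epurateSieve_cons (head : List Int) (rest : List (List Int)) :
    epurateSieve (head :: rest)
      = head :: epurateSieve (rest.filter (fun loc => decide (1 < |pvKey loc - pvKey head|))) := by
  rw [epurateSieve.eq_def]

-- the loop body of A, named for the proofs
def epurateStepA (st : List Int × List (List Int)) (loc : List Int) : List Int × List (List Int) :=
  let x := pvKey loc
  if ¬ x ∈ st.1 ∧ ¬ (x - 1) ∈ st.1 ∧ ¬ (x + 1) ∈ st.1 then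
    (st.1 ++ [x], st.2 ++ [loc])
  else st

theorem epurate_py_eq_foldl (locations : List (List Int)) :
    epurate_py locations = (locations.foldl epurateStepA ([], [])).2 := by
  unfold epurate_py
  have hbody : (fun (st : List Int × List (List Int)) (i : Int) =>
      let loc := PySem.List.pyGetD locations i []
      let x := PySem.List.pyGetD loc 0 0
      if ¬ x ∈ st.1 ∧ ¬ (x - 1) ∈ st.1 ∧ ¬ (x + 1) ∈ st.1 then
        (st.1 ++ [x], st.2 ++ [loc])
      else st)
      = (fun (st : List Int × List (List Int)) (i : Int) =>
          epurateStepA st (PySem.List.pyGetD locations i [])) := rfl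
  rw [hbody, show (locations.length : Int) = PySem.List.len locations from rfl,
      PySem.List.foldl_pyRange_zero_pyGetD locations ([] : List Int)
        epurateStepA (([], []) : List Int × List (List Int))]

-- "x is admissible w.r.t. the kept keys temp", as a Bool
def epOkB (temp : List Int) (x : Int) : Bool :=
  decide (¬ x ∈ temp ∧ ¬ (x - 1) ∈ temp ∧ ¬ (x + 1) ∈ temp)

-- key invariant: A's fold from (temp, ep) over rest appends exactly the sieve of the
-- elements of rest that are admissible w.r.t. temp.
theorem epurate_invariant (rest : List (List Int)) :
    ∀ (temp : List Int) (ep : List (List Int)),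
      (rest.foldl epurateStepA (temp, ep)).2
        = ep ++ epurateSieve (rest.filter (fun loc => epOkB temp (pvKey loc))) := by
  induction rest with
  | nil => intro temp ep; simp [epurateSieve_nil]
  | cons loc rest ih =>
    intro temp ep
    simp only [List.foldl_cons, List.filter_cons]
    by_cases h : ¬ pvKey loc ∈ temp ∧ ¬ (pvKey loc - 1) ∈ temp ∧ ¬ (pvKey loc + 1) ∈ temp
    · have hstep : epurateStepA (temp, ep) loc = (temp ++ [pvKey loc], ep ++ [loc]) := by
        simp only [epurateStepA]; exact if_pos h
      rw [hstep, ih]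
      have hfil :
          rest.filter (fun l => epOkB (temp ++ [pvKey loc]) (pvKey l))
            = (rest.filter (fun l => epOkB temp (pvKey l))).filter
                (fun l => decide (1 < |pvKey l - pvKey loc|)) := by
        rw [List.filter_filter]
        apply List.filter_congr
        intro l _
        rw [Bool.eq_iff_iff]
        simp only [epOkB, Bool.and_eq_true, decide_eq_true_eq, List.mem_append,
          List.mem_singleton]
        constructor
        · rintro ⟨h1, h2, h3⟩
          have k1 : pvKey l ≠ pvKey loc := fun e => h1 (Or.inr e)
          have k2 : pvKey l - 1 ≠ pvKey loc := fun e => h2 (Or.inr e)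
          have k3 : pvKey l + 1 ≠ pvKey loc := fun e => h3 (Or.inr e)
          refine ⟨by rw [lt_abs]; omega, fun h' => h1 (Or.inl h'),
            fun h' => h2 (Or.inl h'), fun h' => h3 (Or.inl h')⟩
        · rintro ⟨hd, h1, h2, h3⟩
          rw [lt_abs] at hd
          refine ⟨?_, ?_, ?_⟩ <;> rintro (h' | h') <;>
            first | exact h1 h' | exact h2 h' | exact h3 h' | omega
      have hok : epOkB temp (pvKey loc) = true := by
        simp only [epOkB, decide_eq_true_eq]; exact h
      rw [hok, if_pos rfl, epurateSieve_cons, ← hfil]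
      simp
    · have hstep : epurateStepA (temp, ep) loc = (temp, ep) := by
        simp only [epurateStepA]; exact if_neg h
      have hok : epOkB temp (pvKey loc) = false := by
        simp only [epOkB, decide_eq_false_iff_not]; exact h
      rw [hstep, ih, hok]
      simp only [Bool.false_eq_true, if_false]

-- ===== VERDICT (by name: the statement is the Claim_ definition above) =====
theorem epurate_py_spec : Claim_equal_epurate_py := by
  intro locations _ _
  show epurate_py locations = epurate_py_alt locations
  rw [epurate_py_eq_foldl, epurate_invariant locations [] []]
  have : locations.filter (fun loc => epOkB [] (pvKey loc)) = locations := by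
    apply List.filter_eq_self.mpr
    intro l _
    simp [epOkB]
  rw [this]
  rfl
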